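-- pv_equiv track=rewrite | github.com/TizianoCausin01/useful_stuff | python_scripts/src/general_utils/utils.py | make_intervals
-- ===== SOURCE A (Python) =====
-- def split_integer(total: int, n: int):
--     """Split total into n nearly equal integer parts."""
--     base = total // n
--     remainder = total % n
--     # distribute the remainder (one extra for the first 'remainder' chunks)
--     parts = [base + 1 if i < remainder else base for i in range(n)]
--     return parts
--
-- def make_intervals(total: int, n: int):
--     parts = split_integer(total, n)
--     intervals = []
--     start = 0
--     for p in parts:
--         intervals.append((start, p))
--         start = start+p
--     return intervals
-- ===== SOURCE B (Python) =====
-- def make_intervals(total: int, n: int):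
--     base, remainder = divmod(total, n)
--     return [(i * base + min(i, remainder), base + 1 if i < remainder else base)
--             for i in range(n)]
-- ===== Notes on version B (the rewrite author's own statement) =====
-- stated objective: simpler
-- what changed: Replaces the split_integer helper (parts list) plus a running-start accumulator loop by a single comprehension computing each interval by closed form: start = i*base + min(i, remainder), length = base+1 if i<remainder else base.
import Mathlib
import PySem

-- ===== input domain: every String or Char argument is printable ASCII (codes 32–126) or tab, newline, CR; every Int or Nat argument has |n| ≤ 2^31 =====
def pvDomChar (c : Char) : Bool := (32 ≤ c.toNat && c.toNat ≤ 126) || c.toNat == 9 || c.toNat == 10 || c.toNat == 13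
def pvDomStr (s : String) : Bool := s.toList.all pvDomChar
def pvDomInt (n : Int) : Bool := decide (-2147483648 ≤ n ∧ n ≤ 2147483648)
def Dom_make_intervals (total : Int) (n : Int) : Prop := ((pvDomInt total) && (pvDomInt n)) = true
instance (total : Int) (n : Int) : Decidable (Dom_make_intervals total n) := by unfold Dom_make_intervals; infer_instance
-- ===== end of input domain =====

-- B replaces A's helper-built parts list and running-start accumulator with a single
-- closed-form comprehension (objective: simpler).

-- ===== PORT A =====
def split_integer (total : Int) (n : Int) : List Int :=
  let base := PySem.Int.floordiv total n
  let remainder := PySem.Int.mod total n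
  (PySem.List.pyRange 0 n 1).map (fun i => if i < remainder then base + 1 else base)

def make_intervals (total : Int) (n : Int) : List (Int × Int) :=
  let parts := split_integer total n
  let fin := parts.foldl
    (fun (st : List (Int × Int) × Int) p => (st.1 ++ [(st.2, p)], st.2 + p)) ([], 0)
  fin.1

-- ===== PORT B =====
def make_intervals_alt (total : Int) (n : Int) : List (Int × Int) :=
  let base := PySem.Int.floordiv total n
  let remainder := PySem.Int.mod total n
  (PySem.List.pyRange 0 n 1).map
    (fun i => (i * base + min i remainder, if i < remainder then base + 1 else base))

-- ===== PRECONDITION & SPEC =====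
-- A raises ZeroDivisionError exactly when n = 0.
def Pre_make_intervals (total : Int) (n : Int) : Prop := n ≠ 0
instance (total : Int) (n : Int) : Decidable (Pre_make_intervals total n) := by
  unfold Pre_make_intervals; infer_instance
def pvWitness_make_intervals : Int × Int := (10, 3)

def Spec_make_intervals (total : Int) (n : Int) (out : List (Int × Int)) : Prop := out = make_intervals_alt total n
instance (total : Int) (n : Int) (out : List (Int × Int)) : Decidable (Spec_make_intervals total n out) := by unfold Spec_make_intervals; infer_instance

-- ===== CLAIM (what is proved, stated in full; the proofs are below) =====
def Claim_equal_make_intervals : Prop := ∀ (total : Int) (n : Int), Dom_make_intervals total n → Pre_make_intervals total n → Spec_make_intervals total n (make_intervals total n)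

-- ===== LEMMAS AND PROOFS =====

-- loop invariant: folding A's parts over range m yields B's closed-form intervals,
-- with accumulated start = m*base + min m r (needs 0 ≤ r, which holds for 0 < n).
theorem pv_fold_range (base r : Int) (hr : 0 ≤ r) (m : Nat) :
    (((List.range m).map (fun (k : Nat) => if (k : Int) < r then base + 1 else base)).foldl
      (fun (st : List (Int × Int) × Int) p => (st.1 ++ [(st.2, p)], st.2 + p)) ([], 0))
    = ((List.range m).map
        (fun (k : Nat) => ((k : Int) * base + min (k : Int) r,
                   if (k : Int) < r then base + 1 else base)),
       (m : Int) * base + min (m : Int) r) := by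
  induction m with
  | zero => simp [min_eq_left hr]
  | succ m ih =>
    rw [List.range_succ, List.map_append, List.foldl_append, ih,
        List.map_append]
    rcases lt_or_ge (m : Int) r with h | h
    · have h1 : min (m : Int) r = m := min_eq_left h.le
      have h2 : min ((m : Int) + 1) r = (m : Int) + 1 := min_eq_left (by omega)
      simp only [List.foldl, List.map_cons, List.map_nil, if_pos h]
      push_cast
      rw [h1, h2]
      simp only [Prod.mk.injEq]
      exact ⟨trivial, by ring⟩
    · have h1 : min (m : Int) r = r := min_eq_right h
      have h2 : min ((m : Int) + 1) r = r := min_eq_right (by omega)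
      simp only [List.foldl, List.map_cons, List.map_nil, if_neg (not_lt.mpr h)]
      push_cast
      rw [h1, h2]
      simp only [Prod.mk.injEq]
      exact ⟨trivial, by ring⟩

-- ===== VERDICT (by name: the statement is the Claim_ definition above) =====
theorem make_intervals_spec : Claim_equal_make_intervals := by
  intro total n _ hn
  unfold Spec_make_intervals make_intervals make_intervals_alt split_integer
  rcases lt_or_ge (0 : Int) n with hpos | hnonpos
  · have hr : 0 ≤ PySem.Int.mod total n := PySem.Int.mod_nonneg total hpos
    rw [PySem.List.pyRange_one]
    simp only [sub_zero, zero_add, List.map_map, Function.comp_def]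
    rw [pv_fold_range _ _ hr]
  · have hle : n ≤ 0 := hnonpos
    rw [PySem.List.pyRange_one_eq_nil hle]
    simp
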